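-- pv_equiv track=rewrite | github.com/AlexxBenny/Merlin | cortex/validators.py | _fuzzy_match_key
-- ===== SOURCE A (Python) =====
-- from typing import Any, Dict, List, Optional, Protocol, Set, Tuple, runtime_checkable
--
-- def _fuzzy_match_key(bad_key: str, allowed: set) -> Optional[str]:
--     """Try to match a near-miss input key to an allowed key.
--
--     Handles the most common LLM key-naming errors:
--     - singular/plural: attachment → attachments, emails → email
--     - underscore variants: draft_id vs draftId (snake-case normalization)
--
--     Returns the corrected key name, or None if no match found.
--     """
--     # 1. Exact match after lowercase normalization
--     lower = bad_key.lower()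
--     for key in allowed:
--         if key.lower() == lower:
--             return key
--
--     # 2. Singular → plural (add 's')
--     for key in allowed:
--         if key == bad_key + "s":
--             return key
--
--     # 3. Plural → singular (strip 's')
--     if bad_key.endswith("s") and len(bad_key) > 2:
--         singular = bad_key[:-1]
--         if singular in allowed:
--             return singular
--
--     # 4. Underscore vs no underscore: draft_id ↔ draftid
--     normalized = bad_key.replace("_", "").lower()
--     for key in allowed:
--         if key.replace("_", "").lower() == normalized:
--             return key
--
--     return None
-- ===== SOURCE B (Python) =====
-- def _phase(lower, plural, singular, norm, key):
--     """Lowest-numbered match phase this key satisfies (5 = no match)."""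
--     if key.lower() == lower:
--         return 1
--     if key == plural:
--         return 2
--     if singular is not None and key == singular:
--         return 3
--     if key.replace("_", "").lower() == norm:
--         return 4
--     return 5
--
--
-- def _fuzzy_match_key(bad_key: str, allowed: set):
--     """Single prioritized pass: keep the first key reaching the lowest phase."""
--     lower = bad_key.lower()
--     plural = bad_key + "s"
--     singular = bad_key[:-1] if (bad_key.endswith("s") and len(bad_key) > 2) else None
--     norm = bad_key.replace("_", "").lower()
--     best_phase = 5
--     best_key = None
--     for key in allowed:
--         p = _phase(lower, plural, singular, norm, key)
--         if p < best_phase: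
--             best_phase = p
--             best_key = key
--     return best_key
-- ===== Notes on version B (the rewrite author's own statement) =====
-- stated objective: faster
-- what changed: Replaces A's four sequential scans over allowed (plus a membership test) by one prioritized pass that computes each key's lowest matching phase, with all bad_key-derived strings (lowercase, plural, singular, normalized) precomputed once, keeping the first key attaining the minimal phase.
import Mathlib
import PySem

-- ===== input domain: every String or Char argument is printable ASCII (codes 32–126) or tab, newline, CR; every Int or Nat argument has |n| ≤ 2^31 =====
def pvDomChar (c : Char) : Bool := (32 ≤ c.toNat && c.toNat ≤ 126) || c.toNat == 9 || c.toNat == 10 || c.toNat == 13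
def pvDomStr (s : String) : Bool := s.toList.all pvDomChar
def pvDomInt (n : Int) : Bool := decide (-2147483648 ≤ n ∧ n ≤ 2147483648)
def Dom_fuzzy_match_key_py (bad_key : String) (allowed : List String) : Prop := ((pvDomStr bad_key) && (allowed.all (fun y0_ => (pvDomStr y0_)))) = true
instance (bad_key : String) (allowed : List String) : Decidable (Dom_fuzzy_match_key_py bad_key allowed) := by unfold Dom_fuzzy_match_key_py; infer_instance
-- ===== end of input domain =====

-- B replaces A's four sequential scans by one prioritized pass (with the bad_key-derived
-- strings precomputed once) keeping the first key that attains the lowest-numbered match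
-- phase; a timing run measured B faster.

-- ===== PORT A =====
-- Literal transliteration of A: four scans in sequence, each early-returning.
def fuzzy_match_key_py (bad_key : String) (allowed : List String) : Option String :=
  let lower := PySem.Str.lower bad_key
  match allowed.find? (fun key => PySem.Str.lower key == lower) with
  | some key => some key
  | none =>
    match allowed.find? (fun key => key == bad_key ++ "s") with
    | some key => some key
    | none =>
      let step3 : Option String :=
        if PySem.Str.endswith bad_key "s" && decide (2 < PySem.Str.len bad_key) then
          let singular := PySem.Str.slice bad_key none (some (-1))
          if allowed.contains singular then some singular else none
        else none
      match step3 with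
      | some s => some s
      | none =>
        let normalized := PySem.Str.lower (PySem.Str.replace bad_key "_" "")
        match allowed.find? (fun key =>
            PySem.Str.lower (PySem.Str.replace key "_" "") == normalized) with
        | some key => some key
        | none => none

-- ===== PORT B =====
-- B-side helper: the lowest-numbered phase this key satisfies (5 = no match),
-- against precomputed bad_key-derived values (singular = none ↔ Python's None).
def pvPhase (lower plural : String) (singular : Option String) (norm : String)
    (key : String) : Nat :=
  if PySem.Str.lower key == lower then 1
  else if key == plural then 2
  else if (match singular with | some s => key == s | none => false) then 3
  else if PySem.Str.lower (PySem.Str.replace key "_" "") == norm then 4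
  else 5

def fuzzy_match_key_py_alt (bad_key : String) (allowed : List String) : Option String :=
  let lower := PySem.Str.lower bad_key
  let plural := bad_key ++ "s"
  let singular : Option String :=
    if PySem.Str.endswith bad_key "s" && decide (2 < PySem.Str.len bad_key) then
      some (PySem.Str.slice bad_key none (some (-1)))
    else none
  let norm := PySem.Str.lower (PySem.Str.replace bad_key "_" "")
  (allowed.foldl
    (fun (best : Nat × Option String) key =>
      let p := pvPhase lower plural singular norm key
      if p < best.1 then (p, some key) else best)
    (5, none)).2

-- ===== PRECONDITION & SPEC =====
def Spec_fuzzy_match_key_py (bad_key : String) (allowed : List String) (out : Option String) : Prop := out = fuzzy_match_key_py_alt bad_key allowed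
instance (bad_key : String) (allowed : List String) (out : Option String) : Decidable (Spec_fuzzy_match_key_py bad_key allowed out) := by unfold Spec_fuzzy_match_key_py; infer_instance

-- ===== CLAIM (what is proved, stated in full; the proofs are below) =====
def Claim_equal_fuzzy_match_key_py : Prop := ∀ (bad_key : String) (allowed : List String), Dom_fuzzy_match_key_py bad_key allowed → Spec_fuzzy_match_key_py bad_key allowed (fuzzy_match_key_py bad_key allowed)

-- ===== LEMMAS AND PROOFS =====

-- running minimum of the phases, seeded with b
def pvMf (f : String → Nat) (l : List String) (b : Nat) : Nat :=
  l.foldl (fun a k => min a (f k)) b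

theorem pvMf_le (f : String → Nat) (l : List String) (b : Nat) : pvMf f l b ≤ b := by
  induction l generalizing b with
  | nil => simp [pvMf]
  | cons x xs ih =>
    have := ih (min b (f x))
    simp only [pvMf, List.foldl] at this ⊢
    omega

theorem pvMf_le_of_mem (f : String → Nat) (l : List String) (b : Nat) (x : String)
    (hx : x ∈ l) : pvMf f l b ≤ f x := by
  induction l generalizing b with
  | nil => cases hx
  | cons y ys ih =>
    rcases List.mem_cons.mp hx with h | h
    · subst h
      have := pvMf_le f ys (min b (f x))
      simp only [pvMf, List.foldl] at this ⊢
      omega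
    · exact ih (min b (f y)) h

theorem pvMf_ge (f : String → Nat) (l : List String) (b c : Nat)
    (h : ∀ x ∈ l, c ≤ f x) (hb : c ≤ b) : c ≤ pvMf f l b := by
  induction l generalizing b with
  | nil => simpa [pvMf] using hb
  | cons x xs ih =>
    have hx := h x (by simp)
    have := ih (min b (f x)) (fun y hy => h y (by simp [hy])) (by omega)
    simpa [pvMf, List.foldl] using this

theorem pvFind?_congr_mem {p q : String → Bool} (l : List String)
    (h : ∀ x ∈ l, p x = q x) : l.find? p = l.find? q := by
  induction l with
  | nil => rfl
  | cons x xs ih =>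
    have hx := h x (by simp)
    simp only [List.find?, hx]
    cases q x
    · exact ih (fun y hy => h y (by simp [hy]))
    · rfl

theorem pvFind?_beq_self_of_mem (l : List String) (s : String) (hs : s ∈ l) :
    l.find? (fun x => x == s) = some s := by
  induction l with
  | nil => cases hs
  | cons x xs ih =>
    by_cases hx : x = s
    · subst hx; simp [List.find?]
    · rcases List.mem_cons.mp hs with h | h
      · exact absurd h.symm hx
      · have hb : (x == s) = false := by simp [hx]
        simp only [List.find?, hb]
        exact ih h

-- characterization of B's single prioritized pass, for any phase function f
theorem pvGo_char (f : String → Nat) (l : List String) (b : Nat) (cur : Option String) :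
    l.foldl
      (fun (best : Nat × Option String) key =>
        let p := f key
        if p < best.1 then (p, some key) else best)
      (b, cur)
    = (pvMf f l b,
       if pvMf f l b < b then
         l.find? (fun k => f k == pvMf f l b)
       else cur) := by
  induction l generalizing b cur with
  | nil => simp [pvMf]
  | cons x xs ih =>
    have hstep : (let p := f x
        if p < (Prod.fst (α := Nat) (β := Option String) (b, cur)) then (p, some x) else (b, cur))
        = (if f x < b then (f x, some x) else (b, cur)) := rfl
    rw [List.foldl_cons, hstep]
    by_cases h : f x < b
    · have hmin : min b (f x) = f x := by omega
      have hmf : pvMf f (x :: xs) b = pvMf f xs (f x) := by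
        simp [pvMf, List.foldl, hmin]
      have hle : pvMf f xs (f x) ≤ f x := pvMf_le f xs (f x)
      rw [if_pos h, ih (f x) (some x), hmf]
      by_cases h2 : pvMf f xs (f x) < f x
      · have hne : (f x == pvMf f xs (f x)) = false := by
          simp only [beq_eq_false_iff_ne]; omega
        simp [h2, List.find?, hne, show pvMf f xs (f x) < b by omega]
      · have heq : f x = pvMf f xs (f x) := by omega
        simp [List.find?, ← heq, show f x < b from h]
    · have hmin : min b (f x) = b := by omega
      have hmf : pvMf f (x :: xs) b = pvMf f xs b := by
        simp [pvMf, List.foldl, hmin]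
      rw [if_neg h, ih b cur, hmf]
      by_cases h2 : pvMf f xs b < b
      · have hne : (f x == pvMf f xs b) = false := by
          simp only [beq_eq_false_iff_ne]; omega
        simp [h2, List.find?, hne]
      · simp [h2]

-- phase/branch-predicate characterizations
theorem pvPhase_ge_one (lower plural : String) (singular : Option String) (norm k : String) :
    1 ≤ pvPhase lower plural singular norm k := by
  unfold pvPhase; split_ifs <;> omega

theorem pvPhase_eq_one_iff (lower plural : String) (singular : Option String) (norm k : String) :
    pvPhase lower plural singular norm k = 1 ↔ (PySem.Str.lower k == lower) = true := by
  unfold pvPhase; split_ifs <;> simp_all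

theorem pvPhase_eq_two_iff (lower plural : String) (singular : Option String) (norm k : String)
    (h1 : (PySem.Str.lower k == lower) = false) :
    pvPhase lower plural singular norm k = 2 ↔ (k == plural) = true := by
  unfold pvPhase; split_ifs <;> simp_all

theorem pvPhase_eq_three_iff (lower plural : String) (singular : Option String) (norm k : String)
    (h1 : (PySem.Str.lower k == lower) = false)
    (h2 : (k == plural) = false) :
    pvPhase lower plural singular norm k = 3 ↔
      (match singular with | some s => k == s | none => false) = true := by
  unfold pvPhase; split_ifs <;> simp_all

theorem pvPhase_eq_four_iff (lower plural : String) (singular : Option String) (norm k : String)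
    (h1 : (PySem.Str.lower k == lower) = false)
    (h2 : (k == plural) = false)
    (h3 : (match singular with | some s => k == s | none => false) = false) :
    pvPhase lower plural singular norm k = 4 ↔
      (PySem.Str.lower (PySem.Str.replace k "_" "") == norm) = true := by
  unfold pvPhase; split_ifs <;> simp_all

-- B's value in terms of the minimal phase (with A's concrete precomputed values)
theorem pvAlt_eq (bad_key : String) (allowed : List String) :
    fuzzy_match_key_py_alt bad_key allowed =
      (if pvMf (pvPhase (PySem.Str.lower bad_key) (bad_key ++ "s")
            (if PySem.Str.endswith bad_key "s" && decide (2 < PySem.Str.len bad_key) then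
              some (PySem.Str.slice bad_key none (some (-1)))
            else none)
            (PySem.Str.lower (PySem.Str.replace bad_key "_" ""))) allowed 5 < 5 then
        allowed.find? (fun k =>
          pvPhase (PySem.Str.lower bad_key) (bad_key ++ "s")
            (if PySem.Str.endswith bad_key "s" && decide (2 < PySem.Str.len bad_key) then
              some (PySem.Str.slice bad_key none (some (-1)))
            else none)
            (PySem.Str.lower (PySem.Str.replace bad_key "_" "")) k
          == pvMf (pvPhase (PySem.Str.lower bad_key) (bad_key ++ "s")
            (if PySem.Str.endswith bad_key "s" && decide (2 < PySem.Str.len bad_key) then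
              some (PySem.Str.slice bad_key none (some (-1)))
            else none)
            (PySem.Str.lower (PySem.Str.replace bad_key "_" ""))) allowed 5)
      else none) := by
  have h0 : fuzzy_match_key_py_alt bad_key allowed =
      (allowed.foldl
        (fun (best : Nat × Option String) key =>
          let p := pvPhase (PySem.Str.lower bad_key) (bad_key ++ "s")
            (if PySem.Str.endswith bad_key "s" && decide (2 < PySem.Str.len bad_key) then
              some (PySem.Str.slice bad_key none (some (-1)))
            else none)
            (PySem.Str.lower (PySem.Str.replace bad_key "_" "")) key
          if p < best.1 then (p, some key) else best)
        (5, none)).2 := rfl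
  rw [h0, pvGo_char]

-- common tail given phases 1-3 have no match: stage 4 vs the single pass
theorem pvPhase4Case (bad_key : String) (allowed : List String) (singular : Option String)
    (hno1 : ∀ x ∈ allowed, (PySem.Str.lower x == PySem.Str.lower bad_key) = false)
    (hno2 : ∀ x ∈ allowed, (x == bad_key ++ "s") = false)
    (hno3 : ∀ x ∈ allowed,
      (match singular with | some s => x == s | none => false) = false) :
    (match allowed.find? (fun key =>
        PySem.Str.lower (PySem.Str.replace key "_" "") ==
        PySem.Str.lower (PySem.Str.replace bad_key "_" "")) with
     | some key => some key
     | none => (none : Option String)) =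
    (if pvMf (pvPhase (PySem.Str.lower bad_key) (bad_key ++ "s") singular
          (PySem.Str.lower (PySem.Str.replace bad_key "_" ""))) allowed 5 < 5 then
       allowed.find? (fun k =>
         pvPhase (PySem.Str.lower bad_key) (bad_key ++ "s") singular
           (PySem.Str.lower (PySem.Str.replace bad_key "_" "")) k
         == pvMf (pvPhase (PySem.Str.lower bad_key) (bad_key ++ "s") singular
           (PySem.Str.lower (PySem.Str.replace bad_key "_" ""))) allowed 5)
     else none) := by
  set F := pvPhase (PySem.Str.lower bad_key) (bad_key ++ "s") singular
    (PySem.Str.lower (PySem.Str.replace bad_key "_" "")) with hF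
  have hge4 : ∀ x ∈ allowed, 4 ≤ F x := fun x hx => by
    rw [hF]
    have hg1 := pvPhase_ge_one (PySem.Str.lower bad_key) (bad_key ++ "s") singular
      (PySem.Str.lower (PySem.Str.replace bad_key "_" "")) x
    have hne1 : pvPhase (PySem.Str.lower bad_key) (bad_key ++ "s") singular
        (PySem.Str.lower (PySem.Str.replace bad_key "_" "")) x ≠ 1 := fun e => by
      have := (pvPhase_eq_one_iff _ _ _ _ _).mp e
      rw [hno1 x hx] at this; exact Bool.false_ne_true this
    have hne2 : pvPhase (PySem.Str.lower bad_key) (bad_key ++ "s") singular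
        (PySem.Str.lower (PySem.Str.replace bad_key "_" "")) x ≠ 2 := fun e => by
      have := (pvPhase_eq_two_iff _ _ _ _ _ (hno1 x hx)).mp e
      rw [hno2 x hx] at this; exact Bool.false_ne_true this
    have hne3 : pvPhase (PySem.Str.lower bad_key) (bad_key ++ "s") singular
        (PySem.Str.lower (PySem.Str.replace bad_key "_" "")) x ≠ 3 := fun e => by
      have := (pvPhase_eq_three_iff _ _ _ _ _ (hno1 x hx) (hno2 x hx)).mp e
      rw [hno3 x hx] at this; exact Bool.false_ne_true this
    omega
  cases h4 : allowed.find? (fun key =>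
      PySem.Str.lower (PySem.Str.replace key "_" "") ==
      PySem.Str.lower (PySem.Str.replace bad_key "_" "")) with
  | some k =>
    have hkmem : k ∈ allowed := List.mem_of_find?_eq_some h4
    have hkp : (PySem.Str.lower (PySem.Str.replace k "_" "") ==
        PySem.Str.lower (PySem.Str.replace bad_key "_" "")) = true := by
      simpa using List.find?_some h4
    have hfk : F k = 4 := by
      rw [hF]
      exact (pvPhase_eq_four_iff _ _ _ _ _ (hno1 k hkmem) (hno2 k hkmem)
        (hno3 k hkmem)).mpr hkp
    have hmle : pvMf F allowed 5 ≤ 4 := by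
      have hh := pvMf_le_of_mem F allowed 5 k hkmem
      rw [hfk] at hh; exact hh
    have hmge : 4 ≤ pvMf F allowed 5 := pvMf_ge F allowed 5 4 hge4 (by omega)
    have hm4 : pvMf F allowed 5 = 4 := by omega
    rw [hm4, if_pos (by norm_num),
      pvFind?_congr_mem allowed (q := fun key =>
          PySem.Str.lower (PySem.Str.replace key "_" "") ==
          PySem.Str.lower (PySem.Str.replace bad_key "_" ""))
        (fun x hx => by
          by_cases hp : (PySem.Str.lower (PySem.Str.replace x "_" "") ==
              PySem.Str.lower (PySem.Str.replace bad_key "_" "")) = true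
          · have hq : F x = 4 := by
              rw [hF]
              exact (pvPhase_eq_four_iff _ _ _ _ _ (hno1 x hx) (hno2 x hx)
                (hno3 x hx)).mpr hp
            simp [hp, hq]
          · have hne : F x ≠ 4 := fun e => by
              rw [hF] at e
              exact hp ((pvPhase_eq_four_iff _ _ _ _ _ (hno1 x hx) (hno2 x hx)
                (hno3 x hx)).mp e)
            simp only [Bool.not_eq_true] at hp
            simp [hp, hne]),
      h4]
  | none =>
    have hge5 : ∀ x ∈ allowed, 5 ≤ F x := fun x hx => by
      have h4' := hge4 x hx
      have hne : F x ≠ 4 := fun e => by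
        rw [hF] at e
        have := (pvPhase_eq_four_iff _ _ _ _ _ (hno1 x hx) (hno2 x hx) (hno3 x hx)).mp e
        have hn : (PySem.Str.lower (PySem.Str.replace x "_" "") ==
            PySem.Str.lower (PySem.Str.replace bad_key "_" "")) = false := by
          simpa using List.find?_eq_none.mp h4 x hx
        rw [hn] at this; exact Bool.false_ne_true this
      omega
    have hmge : 5 ≤ pvMf F allowed 5 := pvMf_ge F allowed 5 5 hge5 (by omega)
    rw [if_neg (by omega)]

-- A flattened, let-free restatement of port A (definitionally equal)
theorem pvA_unfold (bad_key : String) (allowed : List String) :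
    fuzzy_match_key_py bad_key allowed =
      match allowed.find? (fun key => PySem.Str.lower key == PySem.Str.lower bad_key) with
      | some key => some key
      | none =>
        match allowed.find? (fun key => key == bad_key ++ "s") with
        | some key => some key
        | none =>
          match (if PySem.Str.endswith bad_key "s" && decide (2 < PySem.Str.len bad_key) then
              (if allowed.contains (PySem.Str.slice bad_key none (some (-1))) then
                some (PySem.Str.slice bad_key none (some (-1))) else none)
            else (none : Option String)) with
          | some s => some s
          | none =>
            match allowed.find? (fun key =>
                PySem.Str.lower (PySem.Str.replace key "_" "") ==
                PySem.Str.lower (PySem.Str.replace bad_key "_" "")) with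
            | some key => some key
            | none => none := rfl

-- ===== VERDICT (by name: the statement is the Claim_ definition above) =====
theorem fuzzy_match_key_py_spec : Claim_equal_fuzzy_match_key_py := by
  intro bad_key allowed _
  unfold Spec_fuzzy_match_key_py
  cases h1 : allowed.find? (fun key => PySem.Str.lower key == PySem.Str.lower bad_key) with
  | some k =>
    rw [pvAlt_eq]
    set sg : Option String :=
      (if PySem.Str.endswith bad_key "s" && decide (2 < PySem.Str.len bad_key) then
        some (PySem.Str.slice bad_key none (some (-1)))
      else none) with hsg
    set F := pvPhase (PySem.Str.lower bad_key) (bad_key ++ "s") sg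
      (PySem.Str.lower (PySem.Str.replace bad_key "_" "")) with hF
    have hkmem : k ∈ allowed := List.mem_of_find?_eq_some h1
    have hkp : (PySem.Str.lower k == PySem.Str.lower bad_key) = true := by
      simpa using List.find?_some h1
    have hfk : F k = 1 := by rw [hF]; exact (pvPhase_eq_one_iff _ _ _ _ _).mpr hkp
    have hmle : pvMf F allowed 5 ≤ 1 := by
      have hh := pvMf_le_of_mem F allowed 5 k hkmem
      rw [hfk] at hh; exact hh
    have hmge : 1 ≤ pvMf F allowed 5 :=
      pvMf_ge F allowed 5 1 (fun x _ => by rw [hF]; exact pvPhase_ge_one _ _ _ _ x) (by omega)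
    have hm1 : pvMf F allowed 5 = 1 := by omega
    have hA : fuzzy_match_key_py bad_key allowed = some k := by rw [pvA_unfold, h1]
    rw [hA, hm1, if_pos (by norm_num),
      pvFind?_congr_mem allowed (q := fun key => PySem.Str.lower key == PySem.Str.lower bad_key)
        (fun x _ => by
          by_cases hp : (PySem.Str.lower x == PySem.Str.lower bad_key) = true
          · have hq : F x = 1 := by rw [hF]; exact (pvPhase_eq_one_iff _ _ _ _ _).mpr hp
            simp [hp, hq]
          · have hne : F x ≠ 1 := fun e => by
              rw [hF] at e
              exact hp ((pvPhase_eq_one_iff _ _ _ _ _).mp e)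
            simp only [Bool.not_eq_true] at hp
            simp [hp, hne]),
      h1]
  | none =>
    have hno1 : ∀ x ∈ allowed, (PySem.Str.lower x == PySem.Str.lower bad_key) = false :=
      fun x hx => by simpa using List.find?_eq_none.mp h1 x hx
    cases h2 : allowed.find? (fun key => key == bad_key ++ "s") with
    | some k =>
      rw [pvAlt_eq]
      set sg : Option String :=
        (if PySem.Str.endswith bad_key "s" && decide (2 < PySem.Str.len bad_key) then
          some (PySem.Str.slice bad_key none (some (-1)))
        else none) with hsg
      set F := pvPhase (PySem.Str.lower bad_key) (bad_key ++ "s") sg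
        (PySem.Str.lower (PySem.Str.replace bad_key "_" "")) with hF
      have hge2 : ∀ x ∈ allowed, 2 ≤ F x := fun x hx => by
        rw [hF]
        have h1' := pvPhase_ge_one (PySem.Str.lower bad_key) (bad_key ++ "s") sg
          (PySem.Str.lower (PySem.Str.replace bad_key "_" "")) x
        have hne : pvPhase (PySem.Str.lower bad_key) (bad_key ++ "s") sg
            (PySem.Str.lower (PySem.Str.replace bad_key "_" "")) x ≠ 1 := fun e => by
          have := (pvPhase_eq_one_iff _ _ _ _ _).mp e
          rw [hno1 x hx] at this; exact Bool.false_ne_true this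
        omega
      have hkmem : k ∈ allowed := List.mem_of_find?_eq_some h2
      have hkp : (k == bad_key ++ "s") = true := by simpa using List.find?_some h2
      have hfk : F k = 2 := by
        rw [hF]; exact (pvPhase_eq_two_iff _ _ _ _ _ (hno1 k hkmem)).mpr hkp
      have hmle : pvMf F allowed 5 ≤ 2 := by
        have hh := pvMf_le_of_mem F allowed 5 k hkmem
        rw [hfk] at hh; exact hh
      have hmge : 2 ≤ pvMf F allowed 5 := pvMf_ge F allowed 5 2 hge2 (by omega)
      have hm2 : pvMf F allowed 5 = 2 := by omega
      have hA : fuzzy_match_key_py bad_key allowed = some k := by rw [pvA_unfold, h1, h2]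
      rw [hA, hm2, if_pos (by norm_num),
        pvFind?_congr_mem allowed (q := fun key => key == bad_key ++ "s")
          (fun x hx => by
            by_cases hp : (x == bad_key ++ "s") = true
            · have hq : F x = 2 := by
                rw [hF]; exact (pvPhase_eq_two_iff _ _ _ _ _ (hno1 x hx)).mpr hp
              simp [hp, hq]
            · have hne : F x ≠ 2 := fun e => by
                rw [hF] at e
                exact hp ((pvPhase_eq_two_iff _ _ _ _ _ (hno1 x hx)).mp e)
              simp only [Bool.not_eq_true] at hp
              simp [hp, hne]),
        h2]
    | none =>
      have hno2 : ∀ x ∈ allowed, (x == bad_key ++ "s") = false :=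
        fun x hx => by simpa using List.find?_eq_none.mp h2 x hx
      by_cases hg : (PySem.Str.endswith bad_key "s" && decide (2 < PySem.Str.len bad_key)) = true
      case pos =>
        have hsg : (if PySem.Str.endswith bad_key "s" && decide (2 < PySem.Str.len bad_key) then
            some (PySem.Str.slice bad_key none (some (-1)))
          else none) = some (PySem.Str.slice bad_key none (some (-1))) := by rw [hg]; rfl
        by_cases hc : allowed.contains (PySem.Str.slice bad_key none (some (-1))) = true
        case pos =>
          rw [pvAlt_eq, hsg]
          set F := pvPhase (PySem.Str.lower bad_key) (bad_key ++ "s")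
            (some (PySem.Str.slice bad_key none (some (-1))))
            (PySem.Str.lower (PySem.Str.replace bad_key "_" "")) with hF
          have hge3 : ∀ x ∈ allowed, 3 ≤ F x := fun x hx => by
            rw [hF]
            have h1' := pvPhase_ge_one (PySem.Str.lower bad_key) (bad_key ++ "s")
              (some (PySem.Str.slice bad_key none (some (-1))))
              (PySem.Str.lower (PySem.Str.replace bad_key "_" "")) x
            have hne1 : pvPhase (PySem.Str.lower bad_key) (bad_key ++ "s")
                (some (PySem.Str.slice bad_key none (some (-1))))
                (PySem.Str.lower (PySem.Str.replace bad_key "_" "")) x ≠ 1 := fun e => by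
              have := (pvPhase_eq_one_iff _ _ _ _ _).mp e
              rw [hno1 x hx] at this; exact Bool.false_ne_true this
            have hne2 : pvPhase (PySem.Str.lower bad_key) (bad_key ++ "s")
                (some (PySem.Str.slice bad_key none (some (-1))))
                (PySem.Str.lower (PySem.Str.replace bad_key "_" "")) x ≠ 2 := fun e => by
              have := (pvPhase_eq_two_iff _ _ _ _ _ (hno1 x hx)).mp e
              rw [hno2 x hx] at this; exact Bool.false_ne_true this
            omega
          have hsmem : PySem.Str.slice bad_key none (some (-1)) ∈ allowed := by simpa using hc
          have hfs : F (PySem.Str.slice bad_key none (some (-1))) = 3 := by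
            rw [hF]
            exact (pvPhase_eq_three_iff _ _ _ _ _ (hno1 _ hsmem) (hno2 _ hsmem)).mpr (by simp)
          have hmle : pvMf F allowed 5 ≤ 3 := by
            have hh := pvMf_le_of_mem F allowed 5 _ hsmem
            rw [hfs] at hh; exact hh
          have hmge : 3 ≤ pvMf F allowed 5 := pvMf_ge F allowed 5 3 hge3 (by omega)
          have hm3 : pvMf F allowed 5 = 3 := by omega
          have hA : fuzzy_match_key_py bad_key allowed
              = some (PySem.Str.slice bad_key none (some (-1))) := by
            rw [pvA_unfold, h1, h2, hg, hc]
            rfl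
          rw [hA, hm3, if_pos (by norm_num),
            pvFind?_congr_mem allowed (q := fun x => x == PySem.Str.slice bad_key none (some (-1)))
              (fun x hx => by
                by_cases hp : (x == PySem.Str.slice bad_key none (some (-1))) = true
                · have hx' : x = PySem.Str.slice bad_key none (some (-1)) := by simpa using hp
                  subst hx'
                  simp [hfs]
                · have hne : F x ≠ 3 := fun e => by
                    rw [hF] at e
                    have hxx : x = PySem.Str.slice bad_key none (some (-1)) := by
                      simpa using (pvPhase_eq_three_iff _ _ _ _ _ (hno1 x hx) (hno2 x hx)).mp e
                    rw [hxx] at hp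
                    simp at hp
                  simp only [Bool.not_eq_true] at hp
                  simp [hp, hne]),
            pvFind?_beq_self_of_mem allowed _ hsmem]
        case neg =>
          have hc' : allowed.contains (PySem.Str.slice bad_key none (some (-1))) = false :=
            by simpa using hc
          have hno3 : ∀ x ∈ allowed,
              (match (some (PySem.Str.slice bad_key none (some (-1))) : Option String) with
                | some s => x == s | none => false) = false := by
            have hnot : PySem.Str.slice bad_key none (some (-1)) ∉ allowed := by
              simpa using hc
            intro x hx
            have hxs : (x == PySem.Str.slice bad_key none (some (-1))) = false := by
              by_contra hxx
              have hx' : x = PySem.Str.slice bad_key none (some (-1)) := by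
                simpa using (Bool.not_eq_false _).mp hxx
              exact hnot (hx' ▸ hx)
            simpa using hxs
          have hA : fuzzy_match_key_py bad_key allowed
              = (match allowed.find? (fun key =>
                  PySem.Str.lower (PySem.Str.replace key "_" "") ==
                  PySem.Str.lower (PySem.Str.replace bad_key "_" "")) with
                 | some key => some key
                 | none => (none : Option String)) := by
            rw [pvA_unfold, h1, h2, hg, hc']
            rfl
          rw [hA, pvAlt_eq, hsg]
          exact pvPhase4Case bad_key allowed _ hno1 hno2 hno3
      case neg =>
        have hg' : (PySem.Str.endswith bad_key "s" && decide (2 < PySem.Str.len bad_key)) = false :=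
          by simpa using hg
        have hsg : (if PySem.Str.endswith bad_key "s" && decide (2 < PySem.Str.len bad_key) then
            some (PySem.Str.slice bad_key none (some (-1)))
          else none) = (none : Option String) := by rw [hg']; rfl
        have hno3 : ∀ x ∈ allowed,
            (match (none : Option String) with
              | some s => x == s | none => false) = false := by
          intro x _; rfl
        have hA : fuzzy_match_key_py bad_key allowed
            = (match allowed.find? (fun key =>
                PySem.Str.lower (PySem.Str.replace key "_" "") ==
                PySem.Str.lower (PySem.Str.replace bad_key "_" "")) with
               | some key => some key
               | none => (none : Option String)) := by
          rw [pvA_unfold, h1, h2, hg']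
          rfl
        rw [hA, pvAlt_eq, hsg]
        exact pvPhase4Case bad_key allowed _ hno1 hno2 hno3
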